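-- pv_equiv track=rewrite | github.com/AmirArama/MusicProj | chord_types.py | generate_inversions
-- ===== SOURCE A (Python) =====
-- chromatic_notes_flat = ["C", "Db", "D", "Eb", "E", "F", "Gb", "G", "Ab", "A", "Bb", "B"]
--
-- chromatic_notes_sharp = ["C", "C#", "D", "D#", "E", "F", "F#", "G", "G#", "A", "A#", "B"]
--
-- def find_note_index(note):
--     if note in chromatic_notes_flat:
--         return chromatic_notes_flat.index(note)
--     elif note in chromatic_notes_sharp:
--         return chromatic_notes_sharp.index(note)
--     else:
--         return -1
--
-- def generate_inversions(chord_notes, root_pitch,chord_type='major'):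
--     """
--     Generate chord inversions for a chord with any number of notes, accounting for chromatic scale.
--
--     Parameters:
--     chord_notes (list): List of notes in the chord (e.g., ['C', 'E', 'G', 'B']).
--     root_pitch (int): The pitch number of the root note (e.g., 4 for C4).
--
--     Returns:
--     list: List of inversions, each containing notes with their pitches.
--     """
--
--     # Initialize the root position
--     inversions = []
--     pitches = [root_pitch]  # Start with the root pitch
--
--     # Assign pitches based on the chromatic scale and root note
--     root_index = find_note_index(chord_notes[0])  # Index of root in chromatic scale
--     for i in range(1, len(chord_notes)):
--         current_index = find_note_index(chord_notes[i])
--         # If the current note is "lower" in the chromatic scale, it wraps to the next octave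
--         if current_index < find_note_index(chord_notes[i - 1]):
--             pitches.append(pitches[i - 1] + 1)  # Move to the next octave
--         else:
--             pitches.append(pitches[i - 1])  # Stay in the same octave
--
--     # Add the root position to inversions
--     inversions.append(list(zip(chord_notes, pitches)))
--
--     # Generate inversions by rotating the notes
--     for _ in range(len(chord_notes) - 1):
--         # Move the first note up an octave
--         first_note, first_pitch = inversions[-1][0]
--         rest_of_notes = inversions[-1][1:]  # Remaining notes
--         new_inversion = rest_of_notes + [(first_note, first_pitch + 1)]
--         inversions.append(new_inversion)
--
--     return inversions
-- ===== SOURCE B (Python) =====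
-- chromatic_notes_flat = ["C", "Db", "D", "Eb", "E", "F", "Gb", "G", "Ab", "A", "Bb", "B"]
--
-- chromatic_notes_sharp = ["C", "C#", "D", "D#", "E", "F", "F#", "G", "G#", "A", "A#", "B"]
--
--
-- def find_note_index(note):
--     if note in chromatic_notes_flat:
--         return chromatic_notes_flat.index(note)
--     elif note in chromatic_notes_sharp:
--         return chromatic_notes_sharp.index(note)
--     else:
--         return -1
--
--
-- def generate_inversions(chord_notes, root_pitch, chord_type='major'):
--     # Single forward scan: pitch rises by one octave at each chromatic descent.
--     idxs = [find_note_index(n) for n in chord_notes]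
--     pitches = []
--     p = root_pitch
--     prev = idxs[0]
--     for i, cur in enumerate(idxs):
--         if i > 0 and cur < prev:
--             p += 1
--         pitches.append(p)
--         prev = cur
--     base = list(zip(chord_notes, pitches))
--     bumped = [(n, q + 1) for (n, q) in base]
--     # Inversion k by index arithmetic: rotate left by k, bumping the wrapped notes an octave.
--     return [base[k:] + bumped[:k] for k in range(len(base))]
-- ===== Notes on version B (the rewrite author's own statement) =====
-- stated objective: simpler
-- what changed: Pitches are computed by a single forward scan with a running pitch/previous-index accumulator instead of repeated find_note_index recomputation and list self-indexing, and each inversion k is built directly by index arithmetic (base[k:] + bumped base[:k]) instead of iteratively mutating the previous inversion.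
import Mathlib
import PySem

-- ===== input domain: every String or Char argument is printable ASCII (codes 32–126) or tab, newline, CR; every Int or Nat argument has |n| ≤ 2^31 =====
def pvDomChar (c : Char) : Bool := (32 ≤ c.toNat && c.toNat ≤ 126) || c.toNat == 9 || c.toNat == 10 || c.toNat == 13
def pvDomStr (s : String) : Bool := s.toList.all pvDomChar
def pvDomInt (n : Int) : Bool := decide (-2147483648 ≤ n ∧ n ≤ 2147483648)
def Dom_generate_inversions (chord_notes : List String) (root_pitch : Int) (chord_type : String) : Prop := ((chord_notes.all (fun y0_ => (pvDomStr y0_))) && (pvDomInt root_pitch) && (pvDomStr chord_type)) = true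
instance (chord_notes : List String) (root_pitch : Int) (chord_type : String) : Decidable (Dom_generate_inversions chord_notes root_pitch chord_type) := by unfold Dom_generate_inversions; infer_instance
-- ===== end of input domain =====

-- B computes the pitches in one forward scan with a running accumulator and builds each
-- inversion directly by index arithmetic (base[k:] + bumped base[:k]) instead of A's
-- list self-indexing and iterative rotation of the previous inversion; objective: simpler.

-- ===== PORT A =====
def chromatic_notes_flat : List String := ["C", "Db", "D", "Eb", "E", "F", "Gb", "G", "Ab", "A", "Bb", "B"]

def chromatic_notes_sharp : List String := ["C", "C#", "D", "D#", "E", "F", "F#", "G", "G#", "A", "A#", "B"]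

def find_note_index (note : String) : Int :=
  if note ∈ chromatic_notes_flat then
    ((PySem.List.index? chromatic_notes_flat note).getD 0 : Nat)
  else if note ∈ chromatic_notes_sharp then
    ((PySem.List.index? chromatic_notes_sharp note).getD 0 : Nat)
  else -1

def generate_inversions (chord_notes : List String) (root_pitch : Int) (chord_type : String) : List (List (String × Int)) :=
  -- pitches = [root_pitch]; for i in range(1, len(chord_notes)): …
  -- (chord_notes[0] is only read through find_note_index whose value the loop ignores at i=1's
  -- comparison via chord_notes[i-1]; the IndexError of chord_notes[0] on [] is excluded by Pre_,
  -- so the pyGetD defaults below are never taken on admitted inputs)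
  let pitches : List Int :=
    (PySem.List.pyRange 1 (chord_notes.length : Int) 1).foldl
      (fun pitches i =>
        let current_index := find_note_index (PySem.List.pyGetD chord_notes i "")
        if current_index < find_note_index (PySem.List.pyGetD chord_notes (i - 1) "") then
          pitches ++ [PySem.List.pyGetD pitches (i - 1) 0 + 1]
        else
          pitches ++ [PySem.List.pyGetD pitches (i - 1) 0])
      [root_pitch]
  let inversions : List (List (String × Int)) := [chord_notes.zip pitches]
  (PySem.List.pyRange 0 ((chord_notes.length : Int) - 1) 1).foldl
    (fun inversions _ =>
      let last := PySem.List.pyGetD inversions (-1) []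
      match PySem.List.pyGet? last 0 with
      | none => inversions          -- Python raises here; unreachable under Pre_
      | some (first_note, first_pitch) =>
        let rest_of_notes := PySem.List.slice last (some 1) none
        inversions ++ [rest_of_notes ++ [(first_note, first_pitch + 1)]])
    inversions

-- ===== PORT B =====
def generate_inversions_alt (chord_notes : List String) (root_pitch : Int) (chord_type : String) : List (List (String × Int)) :=
  let idxs := chord_notes.map find_note_index
  -- idxs[0] raises IndexError on [] in Python; excluded by Pre_, so the default is never taken
  let st := (PySem.List.enumerate idxs 0).foldl
      (fun (st : List Int × Int × Int) ic =>
        let p := if 0 < ic.1 ∧ ic.2 < st.2.2 then st.2.1 + 1 else st.2.1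
        (st.1 ++ [p], p, ic.2))
      ([], root_pitch, PySem.List.pyGetD idxs 0 0)
  let base := chord_notes.zip st.1
  let bumped := base.map (fun nq => (nq.1, nq.2 + 1))
  (PySem.List.pyRange 0 (chord_notes.length : Int) 1).map
    (fun k =>
      PySem.List.slice base (some k) none ++ PySem.List.slice bumped none (some k))

-- ===== PRECONDITION & SPEC =====
-- Pre_ excludes only the empty chord list, on which both A and B raise IndexError.
def Pre_generate_inversions (chord_notes : List String) (root_pitch : Int) (chord_type : String) : Prop :=
  chord_notes ≠ []
instance (chord_notes : List String) (root_pitch : Int) (chord_type : String) : Decidable (Pre_generate_inversions chord_notes root_pitch chord_type) := by unfold Pre_generate_inversions; infer_instance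

def pvWitness_generate_inversions : List String × Int × String := (["C", "E", "G"], 4, "major")

def Spec_generate_inversions (chord_notes : List String) (root_pitch : Int) (chord_type : String) (out : List (List (String × Int))) : Prop := out = generate_inversions_alt chord_notes root_pitch chord_type
instance (chord_notes : List String) (root_pitch : Int) (chord_type : String) (out : List (List (String × Int))) : Decidable (Spec_generate_inversions chord_notes root_pitch chord_type out) := by unfold Spec_generate_inversions; infer_instance

-- ===== CLAIM (what is proved, stated in full; the proofs are below) =====
def Claim_equal_generate_inversions : Prop := ∀ (chord_notes : List String) (root_pitch : Int) (chord_type : String), Dom_generate_inversions chord_notes root_pitch chord_type → Pre_generate_inversions chord_notes root_pitch chord_type → Spec_generate_inversions chord_notes root_pitch chord_type (generate_inversions chord_notes root_pitch chord_type)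

-- ===== LEMMAS AND PROOFS =====

-- common characterisation of the pitch list after the root
def pitchChain (prev : String) (p : Int) : List String → List Int
  | [] => []
  | n :: rest =>
    let p' := if find_note_index n < find_note_index prev then p + 1 else p
    p' :: pitchChain n p' rest

theorem length_pitchChain (prev : String) (p : Int) (l : List String) :
    (pitchChain prev p l).length = l.length := by
  induction l generalizing prev p with
  | nil => rfl
  | cons n rest ih => simp [pitchChain, ih]

-- the rotated inversion k
def rotInv (base : List (String × Int)) (k : Nat) : List (String × Int) :=
  base.drop k ++ (base.take k).map (fun nq => (nq.1, nq.2 + 1))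

theorem pitchesA_gen (L : List String) (acc : List Int) (a : Nat)
    (ha : 1 ≤ a) (hal : a ≤ L.length) (hlen : acc.length = a) (hne : acc ≠ []) :
    (PySem.List.pyRange (a : Int) (L.length : Int) 1).foldl
      (fun pitches i =>
        let current_index := find_note_index (PySem.List.pyGetD L i "")
        if current_index < find_note_index (PySem.List.pyGetD L (i - 1) "") then
          pitches ++ [PySem.List.pyGetD pitches (i - 1) 0 + 1]
        else
          pitches ++ [PySem.List.pyGetD pitches (i - 1) 0]) acc
    = acc ++ pitchChain (L[a - 1]'(by omega)) (acc.getLast hne) (L.drop a) := by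
  induction hk : L.length - a generalizing a acc with
  | zero =>
    rw [PySem.List.pyRange_one_eq_nil (by omega), List.foldl_nil,
      List.drop_eq_nil_of_le (by omega)]
    simp [pitchChain]
  | succ k ih =>
    have haL : a < L.length := by omega
    rw [PySem.List.pyRange_one_cons (by exact_mod_cast haL), List.foldl_cons]
    have hga : PySem.List.pyGetD L (a : Int) "" = L[a] := by
      rw [PySem.List.pyGetD_natCast, List.getD_eq_getElem L "" haL]
    have hga1 : PySem.List.pyGetD L ((a : Int) - 1) "" = L[a - 1]'(by omega) := by
      have : ((a : Int) - 1) = ((a - 1 : Nat) : Int) := by omega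
      rw [this, PySem.List.pyGetD_natCast, List.getD_eq_getElem L "" (by omega)]
    have hgacc : PySem.List.pyGetD acc ((a : Int) - 1) 0 = acc.getLast hne := by
      have : ((a : Int) - 1) = ((a - 1 : Nat) : Int) := by omega
      rw [this, PySem.List.pyGetD_natCast, List.getD_eq_getElem acc 0 (by omega),
        List.getLast_eq_getElem]
      congr 1
      omega
    simp only [hga, hga1, hgacc]
    set p' : Int := if find_note_index (L[a]'haL) < find_note_index (L[a - 1]'(by omega)) then
        acc.getLast hne + 1 else acc.getLast hne with hp'
    have hbody : (if find_note_index (L[a]'haL) < find_note_index (L[a - 1]'(by omega)) then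
        acc ++ [acc.getLast hne + 1] else acc ++ [acc.getLast hne]) = acc ++ [p'] := by
      rw [hp']
      split <;> rfl
    rw [hbody]
    have hcast : (a : Int) + 1 = ((a + 1 : Nat) : Int) := by omega
    rw [hcast, ih (acc ++ [p']) (a + 1) (by omega) (by omega) (by simp [hlen])
      (by simp) (by omega)]
    rw [List.drop_eq_getElem_cons haL]
    have hlast : (acc ++ [p']).getLast (by simp) = p' := List.getLast_append _
    rw [hlast]
    have hidx : L[a + 1 - 1]'(by omega) = L[a]'haL := by congr 1
    rw [hidx]
    conv_rhs => rw [pitchChain]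
    simp only [← hp', List.append_assoc, List.cons_append, List.nil_append]

theorem pitchesB_gen (rest : List String) (prev : String) (acc : List Int) (p : Int) (s : Int)
    (hs : 0 < s) :
    ((PySem.List.enumerate (rest.map find_note_index) s).foldl
      (fun (st : List Int × Int × Int) ic =>
        (st.1 ++ [if 0 < ic.1 ∧ ic.2 < st.2.2 then st.2.1 + 1 else st.2.1],
          if 0 < ic.1 ∧ ic.2 < st.2.2 then st.2.1 + 1 else st.2.1, ic.2))
      (acc, p, find_note_index prev)).1
    = acc ++ pitchChain prev p rest := by
  induction rest generalizing prev acc p s with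
  | nil => simp [PySem.List.enumerate_nil, pitchChain]
  | cons n rest ih =>
    simp only [List.map_cons, PySem.List.enumerate_cons, List.foldl_cons]
    have hif : (if 0 < s ∧ find_note_index n < find_note_index prev then p + 1 else p)
        = if find_note_index n < find_note_index prev then p + 1 else p := by
      by_cases h : find_note_index n < find_note_index prev <;> simp [h, hs]
    simp only [hif]
    rw [ih n (acc ++ [if find_note_index n < find_note_index prev then p + 1 else p])
      (if find_note_index n < find_note_index prev then p + 1 else p) (s + 1) (by omega)]
    simp [pitchChain]

theorem rotA_gen (base : List (String × Int)) (j : Nat)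
    (hj : j + 1 ≤ base.length) :
    (PySem.List.pyRange (j : Int) ((base.length : Int) - 1) 1).foldl
      (fun inversions _ =>
        let last := PySem.List.pyGetD inversions (-1) []
        match PySem.List.pyGet? last 0 with
        | none => inversions
        | some (first_note, first_pitch) =>
          let rest_of_notes := PySem.List.slice last (some 1) none
          inversions ++ [rest_of_notes ++ [(first_note, first_pitch + 1)]])
      ((List.range (j + 1)).map (rotInv base))
    = (List.range base.length).map (rotInv base) := by
  induction hk : base.length - 1 - j generalizing j with
  | zero =>
    have hj' : j + 1 = base.length := by omega
    rw [PySem.List.pyRange_one_eq_nil (by omega), List.foldl_nil, hj']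
  | succ k ih =>
    have hjlt : j + 1 < base.length := by omega
    rw [PySem.List.pyRange_one_cons (by omega), List.foldl_cons]
    have hlast : PySem.List.pyGetD ((List.range (j + 1)).map (rotInv base)) (-1) []
        = rotInv base j := by
      rw [List.range_succ, List.map_append, List.map_singleton,
        PySem.List.pyGetD_neg_one_append_singleton]
    have hdrop : base.drop j = base[j]'(by omega) :: base.drop (j + 1) :=
      List.drop_eq_getElem_cons (by omega)
    have hrot : rotInv base j = base[j]'(by omega) ::
        (base.drop (j + 1) ++ (base.take j).map (fun nq => (nq.1, nq.2 + 1))) := by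
      rw [rotInv, hdrop, List.cons_append]
    have hget : PySem.List.pyGet? (rotInv base j) 0 = some (base[j]'(by omega)) := by
      rw [hrot, PySem.List.pyGet?_zero_cons]
    have htail : PySem.List.slice (rotInv base j) (some 1) none
        = base.drop (j + 1) ++ (base.take j).map (fun nq => (nq.1, nq.2 + 1)) := by
      rw [PySem.List.slice_from_one, hrot, List.tail_cons]
    have hnew : base.drop (j + 1) ++ (base.take j).map (fun nq => (nq.1, nq.2 + 1))
        ++ [((base[j]'(by omega)).1, (base[j]'(by omega)).2 + 1)] = rotInv base (j + 1) := by
      rw [rotInv, List.take_add_one, List.getElem?_eq_getElem (by omega : j < base.length)]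
      simp only [Option.toList_some, List.map_append, List.map_singleton, List.append_assoc]
    have hstate :
        (List.range (j + 1)).map (rotInv base) ++
          [base.drop (j + 1) ++ (base.take j).map (fun nq => (nq.1, nq.2 + 1)) ++
              [((base[j]'(by omega)).1, (base[j]'(by omega)).2 + 1)]] =
        (List.range (j + 1 + 1)).map (rotInv base) := by
      rw [List.range_succ (n := j + 1), List.map_append, List.map_singleton]
      congr 1
      exact congrArg (fun z => [z]) hnew
    simp only [hlast, hget, htail, List.get_eq_getElem, hstate]
    have hcast : (j : Int) + 1 = ((j + 1 : Nat) : Int) := by omega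
    rw [hcast]
    exact ih (j + 1) (by omega) (by omega)

-- ===== VERDICT (by name: the statement is the Claim_ definition above) =====
theorem pitches_eq (x : String) (xs : List String) (root_pitch : Int) :
    (PySem.List.pyRange 1 ((x :: xs).length : Int) 1).foldl
      (fun pitches i =>
        let current_index := find_note_index (PySem.List.pyGetD (x :: xs) i "")
        if current_index < find_note_index (PySem.List.pyGetD (x :: xs) (i - 1) "") then
          pitches ++ [PySem.List.pyGetD pitches (i - 1) 0 + 1]
        else
          pitches ++ [PySem.List.pyGetD pitches (i - 1) 0]) [root_pitch]
    = root_pitch :: pitchChain x root_pitch xs := by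
  have h := pitchesA_gen (x :: xs) [root_pitch] 1 (by omega) (by simp) (by simp) (by simp)
  simpa using h

theorem generate_inversions_spec : Claim_equal_generate_inversions := by
  intro chord_notes root_pitch chord_type _ hpre
  unfold Spec_generate_inversions
  obtain ⟨x, xs, rfl⟩ : ∃ y ys, chord_notes = y :: ys := by
    cases chord_notes with
    | nil => exact absurd rfl hpre
    | cons y ys => exact ⟨y, ys, rfl⟩
  have hP : ∀ P : List Int, P = root_pitch :: pitchChain x root_pitch xs →
      generate_inversions (x :: xs) root_pitch chord_type
        = generate_inversions_alt (x :: xs) root_pitch chord_type := by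
    intro P hPdef
    -- the shared pitch list and base
    have hlenP : P.length = (x :: xs).length := by
      rw [hPdef]; simp [length_pitchChain]
    -- A's side
    rw [generate_inversions, generate_inversions_alt]
    rw [pitches_eq, ← hPdef]
    -- B's side pitch loop
    have hB : ((PySem.List.enumerate ((x :: xs).map find_note_index) 0).foldl
        (fun (st : List Int × Int × Int) ic =>
          let p := if 0 < ic.1 ∧ ic.2 < st.2.2 then st.2.1 + 1 else st.2.1
          (st.1 ++ [p], p, ic.2))
        ([], root_pitch, PySem.List.pyGetD ((x :: xs).map find_note_index) 0 0)).1 = P := by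
      rw [List.map_cons, PySem.List.enumerate_cons, List.foldl_cons]
      simp only [PySem.List.pyGetD_zero_cons]
      have h0 : (if (0 : Int) < 0 ∧ find_note_index x < find_note_index x
          then root_pitch + 1 else root_pitch) = root_pitch := by simp
      simp only [h0, List.nil_append, zero_add]
      rw [pitchesB_gen xs x [root_pitch] root_pitch 1 (by omega)]
      simp [hPdef]
    rw [hB]
    set base := (x :: xs).zip P with hbase
    have hlenbase : base.length = (x :: xs).length := by
      rw [hbase, List.length_zip, hlenP]; omega
    -- B's comprehension is the list of rotations
    have hBout : (PySem.List.pyRange 0 (((x :: xs).length : Nat) : Int) 1).map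
        (fun k => PySem.List.slice base (some k) none ++
          PySem.List.slice (base.map (fun nq => (nq.1, nq.2 + 1))) none (some k))
        = (List.range base.length).map (rotInv base) := by
      rw [PySem.List.pyRange_zero_nat, List.map_map, hlenbase]
      refine List.map_congr_left ?_
      intro k _
      simp only [Function.comp_apply, PySem.List.slice_from_natCast,
        PySem.List.slice_to_natCast, rotInv, List.map_take]
    rw [hBout]
    -- A's rotation loop produces the same rotations
    have hbase0 : rotInv base 0 = base := by simp [rotInv]
    have h01 : ([base] : List (List (String × Int)))
        = (List.range (0 + 1)).map (rotInv base) := by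
      simp [hbase0]
    rw [h01]
    have hlen1 : (((x :: xs).length : Nat) : Int) - 1 = ((base.length : Nat) : Int) - 1 := by
      rw [hlenbase]
    rw [hlen1]
    have := rotA_gen base 0 (by rw [hlenbase]; simp)
    simpa using this
  exact hP _ rfl
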